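-- pv_equiv track=rewrite | github.com/khdrvss/fikrly | frontend/management/commands/populate_categories.py | get_category_icon_and_color
-- ===== SOURCE A (Python) =====
-- def get_category_icon_and_color(name):
--     """Return appropriate icon and color based on category name"""
--     name_lower = name.lower()
--
--     # Simple stroke-based icons (the original working style)
--     if any(word in name_lower for word in ['restoran', 'kafe', 'fast-food', 'ovqat']):
--         return '<path stroke-linecap="round" stroke-linejoin="round" stroke-width="2" d="M12 6.253v13m0-13C10.832 5.477 9.246 5 7.5 5S4.168 5.477 3 6.253v13C4.168 18.477 5.754 18 7.5 18s3.332.477 4.5 1.253m0-13C13.168 5.477 14.754 5 16.5 5c1.747 0 3.332.477 4.5 1.253v13C19.832 18.477 18.247 18 16.5 18c-1.746 0-3.332.477-4.5 1.253"/>', 'red'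
--     elif any(word in name_lower for word in ['bank', 'moliya', 'fintech']):
--         return '<path stroke-linecap="round" stroke-linejoin="round" stroke-width="2" d="M19 21V5a2 2 0 00-2-2H7a2 2 0 00-2 2v16m14 0h2m-2 0h-5m-9 0H3m2 0h5M9 7h1m-1 4h1m4-4h1m-1 4h1m-5 10v-5a1 1 0 011-1h2a1 1 0 011 1v5m-4 0h4"/>', 'blue'
--     elif any(word in name_lower for word in ['it', 'texnologiya', 'dasturlash', 'konsalting', 'raqamli']):
--         return '<path stroke-linecap="round" stroke-linejoin="round" stroke-width="2" d="M9 12l2 2 4-4m6 2a9 9 0 11-18 0 9 9 0 0118 0z"/>', 'purple'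
--     elif any(word in name_lower for word in ['tibbiyot', 'klinika', 'dorixona', 'health']):
--         return '<path stroke-linecap="round" stroke-linejoin="round" stroke-width="2" d="M4.318 6.318a4.5 4.5 0 000 6.364L12 20.364l7.682-7.682a4.5 4.5 0 00-6.364-6.364L12 7.636l-1.318-1.318a4.5 4.5 0 00-6.364 0z"/>', 'green'
--     elif any(word in name_lower for word in ['ta\'lim', 'maktab', 'universitet', 'kurs']):
--         return '<path stroke-linecap="round" stroke-linejoin="round" stroke-width="2" d="M12 6.253v13m0-13C10.832 5.477 9.246 5 7.5 5S4.168 5.477 3 6.253v13C4.168 18.477 5.754 18 7.5 18s3.332.477 4.5 1.253m0-13C13.168 5.477 14.754 5 16.5 5c1.747 0 3.332.477 4.5 1.253v13C19.832 18.477 18.247 18 16.5 18c-1.746 0-3.332.477-4.5 1.253"/>', 'orange'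
--     elif any(word in name_lower for word in ['savdo', 'do\'kon', 'supermarket', 'chakana', 'commerce', 'elektronika']):
--         return '<path stroke-linecap="round" stroke-linejoin="round" stroke-width="2" d="M16 11V7a4 4 0 00-8 0v4M5 9h14l1 12H4L5 9z"/>', 'yellow'
--     elif any(word in name_lower for word in ['avtomobil', 'automotive', 'transport', 'avto']):
--         return '<path stroke-linecap="round" stroke-linejoin="round" stroke-width="2" d="M13 16h-1v-4h-1m1-4h.01M21 12a9 9 0 11-18 0 9 9 0 0118 0z"/>', 'gray'
--     elif any(word in name_lower for word in ['qurilish', 'construction', 'materiallari']):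
--         return '<path stroke-linecap="round" stroke-linejoin="round" stroke-width="2" d="M19 21V5a2 2 0 00-2-2H7a2 2 0 00-2 2v16m14 0h2m-2 0h-5m-9 0H3m2 0h5M9 7h1m-1 4h1m4-4h1m-1 4h1m-5 10v-5a1 1 0 011-1h2a1 1 0 011 1v5m-4 0h4"/>', 'orange'
--     elif any(word in name_lower for word in ['telekommunikatsiya', 'operator', 'mobile']):
--         return '<path stroke-linecap="round" stroke-linejoin="round" stroke-width="2" d="M12 18h.01M8 21h8a2 2 0 002-2V5a2 2 0 00-2-2H8a2 2 0 00-2 2v14a2 2 0 002 2z"/>', 'blue'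
--     elif any(word in name_lower for word in ['energetika', 'energy', 'electricity']):
--         return '<path stroke-linecap="round" stroke-linejoin="round" stroke-width="2" d="M13 10V3L4 14h7v7l9-11h-7z"/>', 'yellow'
--     elif any(word in name_lower for word in ['to\'qimachilik', 'textile', 'fashion']):
--         return '<path stroke-linecap="round" stroke-linejoin="round" stroke-width="2" d="M7 21a4 4 0 01-4-4V5a2 2 0 012-2h4a2 2 0 012 2v12a4 4 0 01-4 4zm0 0h12a2 2 0 002-2v-4a2 2 0 00-2-2h-2.343M11 7.343l1.657-1.657a2 2 0 012.828 0l2.829 2.829a2 2 0 010 2.828l-8.486 8.485M7 17h.01"/>', 'pink'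
--     elif any(word in name_lower for word in ['metallurgiya', 'metal', 'mining', 'konchilik']):
--         return '<path stroke-linecap="round" stroke-linejoin="round" stroke-width="2" d="M10.325 4.317c.426-1.756 2.924-1.756 3.35 0a1.724 1.724 0 002.573 1.066c1.543-.94 3.31.826 2.37 2.37a1.724 1.724 0 001.065 2.572c1.756.426 1.756 2.924 0 3.35a1.724 1.724 0 00-1.066 2.573c.94 1.543-.826 3.31-2.37 2.37a1.724 1.724 0 00-2.572 1.065c-.426 1.756-2.924 1.756-3.35 0a1.724 1.724 0 00-2.573-1.066c-1.543.94-3.31-.826-2.37-2.37a1.724 1.724 0 00-1.065-2.572c-1.756-.426-1.756-2.924 0-3.35a1.724 1.724 0 001.066-2.573c-.94-1.543.826-3.31 2.37-2.37.996.608 2.296.07 2.572-1.065z"/><path stroke-linecap="round" stroke-linejoin="round" stroke-width="2" d="M15 12a3 3 0 11-6 0 3 3 0 016 0z"/>', 'gray'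
--     elif any(word in name_lower for word in ['aviatsiya', 'aviation', 'aircraft']):
--         return '<path stroke-linecap="round" stroke-linejoin="round" stroke-width="2" d="M12 19l9 2-9-18-9 18 9-2zm0 0v-8"/>', 'blue'
--     elif any(word in name_lower for word in ['beverage', 'ichimlik', 'drink']):
--         return '<path stroke-linecap="round" stroke-linejoin="round" stroke-width="2" d="M8 5H6a2 2 0 00-2 2v6a2 2 0 002 2h2m2-2V9a2 2 0 012-2h2a2 2 0 012 2v.01M15 8v.01"/>', 'green'
--     elif any(word in name_lower for word in ['kimyo', 'chemical', 'sanoati']):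
--         return '<path stroke-linecap="round" stroke-linejoin="round" stroke-width="2" d="M19.428 15.428a2 2 0 00-1.022-.547l-2.387-.477a6 6 0 00-3.86.517l-.318.158a6 6 0 01-3.86.517L6.05 15.21a2 2 0 00-1.806.547M8 4h8l-1 1v5.172a2 2 0 00.586 1.414l5 5c1.26 1.26.367 3.414-1.415 3.414H4.828c-1.782 0-2.674-2.154-1.414-3.414l5-5A2 2 0 009 10.172V5L8 4z"/>', 'purple'
--     elif any(word in name_lower for word in ['mulk', 'real estate', 'property']):
--         return '<path d="M10 20V14H14V20H19V12H22L12 3L2 12H5V20H10Z"/>', 'green'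
--     elif any(word in name_lower for word in ['logistika', 'yetkazib', 'delivery', 'eksport']):
--         return '<path d="M14 18V6C14 5.45 13.55 5 13 5H11C10.45 5 10 5.45 10 6V18L7 21L12 19L17 21L14 18Z"/>', 'orange'
--     elif any(word in name_lower for word in ['oil', 'gas', 'neft']):
--         return '<path d="M9 2V13C9 14.1 9.9 15 11 15H13C14.1 15 15 14.1 15 13V2H9Z"/><path d="M12 15V22"/>', 'gray'
--     elif any(word in name_lower for word in ['test', 'sinov']):
--         return '<path d="M14 2H6C4.9 2 4.01 2.9 4.01 4L4 20C4 21.1 4.89 22 6 22H18C19.1 22 20 21.1 20 20V8L14 2Z"/>', 'gray'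
--     else:
--         # Default icon and color
--         return '<path d="M12 2L2 7L12 12L22 7L12 2Z"/><path d="M2 17L12 22L22 17"/><path d="M2 12L12 17L22 12"/>', 'gray'
-- ===== SOURCE B (Python) =====
-- # Flat keyword->priority map plus an output table: collect every matching keyword's
-- # priority, take the minimum, and index the table (default = last slot).
-- _PRIORITY = {
--     'restoran': 0,
--     'kafe': 0,
--     'fast-food': 0,
--     'ovqat': 0,
--     'bank': 1,
--     'moliya': 1,
--     'fintech': 1,
--     'it': 2,
--     'texnologiya': 2,
--     'dasturlash': 2,
--     'konsalting': 2,
--     'raqamli': 2,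
--     'tibbiyot': 3,
--     'klinika': 3,
--     'dorixona': 3,
--     'health': 3,
--     "ta'lim": 4,
--     'maktab': 4,
--     'universitet': 4,
--     'kurs': 4,
--     'savdo': 5,
--     "do'kon": 5,
--     'supermarket': 5,
--     'chakana': 5,
--     'commerce': 5,
--     'elektronika': 5,
--     'avtomobil': 6,
--     'automotive': 6,
--     'transport': 6,
--     'avto': 6,
--     'qurilish': 7,
--     'construction': 7,
--     'materiallari': 7,
--     'telekommunikatsiya': 8,
--     'operator': 8,
--     'mobile': 8,
--     'energetika': 9,
--     'energy': 9,
--     'electricity': 9,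
--     "to'qimachilik": 10,
--     'textile': 10,
--     'fashion': 10,
--     'metallurgiya': 11,
--     'metal': 11,
--     'mining': 11,
--     'konchilik': 11,
--     'aviatsiya': 12,
--     'aviation': 12,
--     'aircraft': 12,
--     'beverage': 13,
--     'ichimlik': 13,
--     'drink': 13,
--     'kimyo': 14,
--     'chemical': 14,
--     'sanoati': 14,
--     'mulk': 15,
--     'real estate': 15,
--     'property': 15,
--     'logistika': 16,
--     'yetkazib': 16,
--     'delivery': 16,
--     'eksport': 16,
--     'oil': 17,
--     'gas': 17,
--     'neft': 17,
--     'test': 18,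
--     'sinov': 18,
-- }
--
-- _OUT = [
--     ('<path stroke-linecap="round" stroke-linejoin="round" stroke-width="2" d="M12 6.253v13m0-13C10.832 5.477 9.246 5 7.5 5S4.168 5.477 3 6.253v13C4.168 18.477 5.754 18 7.5 18s3.332.477 4.5 1.253m0-13C13.168 5.477 14.754 5 16.5 5c1.747 0 3.332.477 4.5 1.253v13C19.832 18.477 18.247 18 16.5 18c-1.746 0-3.332.477-4.5 1.253"/>', 'red'),
--     ('<path stroke-linecap="round" stroke-linejoin="round" stroke-width="2" d="M19 21V5a2 2 0 00-2-2H7a2 2 0 00-2 2v16m14 0h2m-2 0h-5m-9 0H3m2 0h5M9 7h1m-1 4h1m4-4h1m-1 4h1m-5 10v-5a1 1 0 011-1h2a1 1 0 011 1v5m-4 0h4"/>', 'blue'),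
--     ('<path stroke-linecap="round" stroke-linejoin="round" stroke-width="2" d="M9 12l2 2 4-4m6 2a9 9 0 11-18 0 9 9 0 0118 0z"/>', 'purple'),
--     ('<path stroke-linecap="round" stroke-linejoin="round" stroke-width="2" d="M4.318 6.318a4.5 4.5 0 000 6.364L12 20.364l7.682-7.682a4.5 4.5 0 00-6.364-6.364L12 7.636l-1.318-1.318a4.5 4.5 0 00-6.364 0z"/>', 'green'),
--     ('<path stroke-linecap="round" stroke-linejoin="round" stroke-width="2" d="M12 6.253v13m0-13C10.832 5.477 9.246 5 7.5 5S4.168 5.477 3 6.253v13C4.168 18.477 5.754 18 7.5 18s3.332.477 4.5 1.253m0-13C13.168 5.477 14.754 5 16.5 5c1.747 0 3.332.477 4.5 1.253v13C19.832 18.477 18.247 18 16.5 18c-1.746 0-3.332.477-4.5 1.253"/>', 'orange'),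
--     ('<path stroke-linecap="round" stroke-linejoin="round" stroke-width="2" d="M16 11V7a4 4 0 00-8 0v4M5 9h14l1 12H4L5 9z"/>', 'yellow'),
--     ('<path stroke-linecap="round" stroke-linejoin="round" stroke-width="2" d="M13 16h-1v-4h-1m1-4h.01M21 12a9 9 0 11-18 0 9 9 0 0118 0z"/>', 'gray'),
--     ('<path stroke-linecap="round" stroke-linejoin="round" stroke-width="2" d="M19 21V5a2 2 0 00-2-2H7a2 2 0 00-2 2v16m14 0h2m-2 0h-5m-9 0H3m2 0h5M9 7h1m-1 4h1m4-4h1m-1 4h1m-5 10v-5a1 1 0 011-1h2a1 1 0 011 1v5m-4 0h4"/>', 'orange'),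
--     ('<path stroke-linecap="round" stroke-linejoin="round" stroke-width="2" d="M12 18h.01M8 21h8a2 2 0 002-2V5a2 2 0 00-2-2H8a2 2 0 00-2 2v14a2 2 0 002 2z"/>', 'blue'),
--     ('<path stroke-linecap="round" stroke-linejoin="round" stroke-width="2" d="M13 10V3L4 14h7v7l9-11h-7z"/>', 'yellow'),
--     ('<path stroke-linecap="round" stroke-linejoin="round" stroke-width="2" d="M7 21a4 4 0 01-4-4V5a2 2 0 012-2h4a2 2 0 012 2v12a4 4 0 01-4 4zm0 0h12a2 2 0 002-2v-4a2 2 0 00-2-2h-2.343M11 7.343l1.657-1.657a2 2 0 012.828 0l2.829 2.829a2 2 0 010 2.828l-8.486 8.485M7 17h.01"/>', 'pink'),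
--     ('<path stroke-linecap="round" stroke-linejoin="round" stroke-width="2" d="M10.325 4.317c.426-1.756 2.924-1.756 3.35 0a1.724 1.724 0 002.573 1.066c1.543-.94 3.31.826 2.37 2.37a1.724 1.724 0 001.065 2.572c1.756.426 1.756 2.924 0 3.35a1.724 1.724 0 00-1.066 2.573c.94 1.543-.826 3.31-2.37 2.37a1.724 1.724 0 00-2.572 1.065c-.426 1.756-2.924 1.756-3.35 0a1.724 1.724 0 00-2.573-1.066c-1.543.94-3.31-.826-2.37-2.37a1.724 1.724 0 00-1.065-2.572c-1.756-.426-1.756-2.924 0-3.35a1.724 1.724 0 001.066-2.573c-.94-1.543.826-3.31 2.37-2.37.996.608 2.296.07 2.572-1.065z"/><path stroke-linecap="round" stroke-linejoin="round" stroke-width="2" d="M15 12a3 3 0 11-6 0 3 3 0 016 0z"/>', 'gray'),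
--     ('<path stroke-linecap="round" stroke-linejoin="round" stroke-width="2" d="M12 19l9 2-9-18-9 18 9-2zm0 0v-8"/>', 'blue'),
--     ('<path stroke-linecap="round" stroke-linejoin="round" stroke-width="2" d="M8 5H6a2 2 0 00-2 2v6a2 2 0 002 2h2m2-2V9a2 2 0 012-2h2a2 2 0 012 2v.01M15 8v.01"/>', 'green'),
--     ('<path stroke-linecap="round" stroke-linejoin="round" stroke-width="2" d="M19.428 15.428a2 2 0 00-1.022-.547l-2.387-.477a6 6 0 00-3.86.517l-.318.158a6 6 0 01-3.86.517L6.05 15.21a2 2 0 00-1.806.547M8 4h8l-1 1v5.172a2 2 0 00.586 1.414l5 5c1.26 1.26.367 3.414-1.415 3.414H4.828c-1.782 0-2.674-2.154-1.414-3.414l5-5A2 2 0 009 10.172V5L8 4z"/>', 'purple'),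
--     ('<path d="M10 20V14H14V20H19V12H22L12 3L2 12H5V20H10Z"/>', 'green'),
--     ('<path d="M14 18V6C14 5.45 13.55 5 13 5H11C10.45 5 10 5.45 10 6V18L7 21L12 19L17 21L14 18Z"/>', 'orange'),
--     ('<path d="M9 2V13C9 14.1 9.9 15 11 15H13C14.1 15 15 14.1 15 13V2H9Z"/><path d="M12 15V22"/>', 'gray'),
--     ('<path d="M14 2H6C4.9 2 4.01 2.9 4.01 4L4 20C4 21.1 4.89 22 6 22H18C19.1 22 20 21.1 20 20V8L14 2Z"/>', 'gray'),
--     ('<path d="M12 2L2 7L12 12L22 7L12 2Z"/><path d="M2 17L12 22L22 17"/><path d="M2 12L12 17L22 12"/>', 'gray'),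
-- ]
--
-- def get_category_icon_and_color(name):
--     """Return appropriate icon and color based on category name"""
--     s = name.lower()
--     return _OUT[min((p for w, p in _PRIORITY.items() if w in s), default=len(_OUT) - 1)]
-- ===== Notes on version B (the rewrite author's own statement) =====
-- stated objective: alternative
-- what changed: Replaces the 19-branch first-match elif chain by a flat keyword->priority dict: B collects the priorities of all keywords occurring in the lowered name, takes the minimum, and indexes an output table (last slot = default), instead of short-circuiting on the first matching rule group.
import Mathlib
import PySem

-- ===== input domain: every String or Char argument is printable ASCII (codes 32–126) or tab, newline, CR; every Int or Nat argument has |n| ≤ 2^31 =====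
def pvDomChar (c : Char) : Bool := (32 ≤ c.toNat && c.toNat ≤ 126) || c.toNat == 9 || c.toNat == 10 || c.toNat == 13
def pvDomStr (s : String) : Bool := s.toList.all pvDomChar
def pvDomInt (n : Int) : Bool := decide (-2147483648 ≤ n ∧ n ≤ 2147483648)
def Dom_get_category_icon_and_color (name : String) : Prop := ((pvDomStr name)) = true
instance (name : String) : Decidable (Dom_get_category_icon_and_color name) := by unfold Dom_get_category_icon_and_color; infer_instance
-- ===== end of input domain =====

-- B replaces A's 19-branch first-match elif chain by a flat keyword->priority map: it collects
-- the priorities of ALL matching keywords, takes the minimum, and indexes an output table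
-- (default = last slot); objective: alternative aggregation (min over matches vs first match).
def pvIcon0 : String := "<path stroke-linecap=\"round\" stroke-linejoin=\"round\" stroke-width=\"2\" d=\"M12 6.253v13m0-13C10.832 5.477 9.246 5 7.5 5S4.168 5.477 3 6.253v13C4.168 18.477 5.754 18 7.5 18s3.332.477 4.5 1.253m0-13C13.168 5.477 14.754 5 16.5 5c1.747 0 3.332.477 4.5 1.253v13C19.832 18.477 18.247 18 16.5 18c-1.746 0-3.332.477-4.5 1.253\"/>"
def pvIcon1 : String := "<path stroke-linecap=\"round\" stroke-linejoin=\"round\" stroke-width=\"2\" d=\"M19 21V5a2 2 0 00-2-2H7a2 2 0 00-2 2v16m14 0h2m-2 0h-5m-9 0H3m2 0h5M9 7h1m-1 4h1m4-4h1m-1 4h1m-5 10v-5a1 1 0 011-1h2a1 1 0 011 1v5m-4 0h4\"/>"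
def pvIcon2 : String := "<path stroke-linecap=\"round\" stroke-linejoin=\"round\" stroke-width=\"2\" d=\"M9 12l2 2 4-4m6 2a9 9 0 11-18 0 9 9 0 0118 0z\"/>"
def pvIcon3 : String := "<path stroke-linecap=\"round\" stroke-linejoin=\"round\" stroke-width=\"2\" d=\"M4.318 6.318a4.5 4.5 0 000 6.364L12 20.364l7.682-7.682a4.5 4.5 0 00-6.364-6.364L12 7.636l-1.318-1.318a4.5 4.5 0 00-6.364 0z\"/>"
def pvIcon4 : String := "<path stroke-linecap=\"round\" stroke-linejoin=\"round\" stroke-width=\"2\" d=\"M12 6.253v13m0-13C10.832 5.477 9.246 5 7.5 5S4.168 5.477 3 6.253v13C4.168 18.477 5.754 18 7.5 18s3.332.477 4.5 1.253m0-13C13.168 5.477 14.754 5 16.5 5c1.747 0 3.332.477 4.5 1.253v13C19.832 18.477 18.247 18 16.5 18c-1.746 0-3.332.477-4.5 1.253\"/>"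
def pvIcon5 : String := "<path stroke-linecap=\"round\" stroke-linejoin=\"round\" stroke-width=\"2\" d=\"M16 11V7a4 4 0 00-8 0v4M5 9h14l1 12H4L5 9z\"/>"
def pvIcon6 : String := "<path stroke-linecap=\"round\" stroke-linejoin=\"round\" stroke-width=\"2\" d=\"M13 16h-1v-4h-1m1-4h.01M21 12a9 9 0 11-18 0 9 9 0 0118 0z\"/>"
def pvIcon7 : String := "<path stroke-linecap=\"round\" stroke-linejoin=\"round\" stroke-width=\"2\" d=\"M19 21V5a2 2 0 00-2-2H7a2 2 0 00-2 2v16m14 0h2m-2 0h-5m-9 0H3m2 0h5M9 7h1m-1 4h1m4-4h1m-1 4h1m-5 10v-5a1 1 0 011-1h2a1 1 0 011 1v5m-4 0h4\"/>"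
def pvIcon8 : String := "<path stroke-linecap=\"round\" stroke-linejoin=\"round\" stroke-width=\"2\" d=\"M12 18h.01M8 21h8a2 2 0 002-2V5a2 2 0 00-2-2H8a2 2 0 00-2 2v14a2 2 0 002 2z\"/>"
def pvIcon9 : String := "<path stroke-linecap=\"round\" stroke-linejoin=\"round\" stroke-width=\"2\" d=\"M13 10V3L4 14h7v7l9-11h-7z\"/>"
def pvIcon10 : String := "<path stroke-linecap=\"round\" stroke-linejoin=\"round\" stroke-width=\"2\" d=\"M7 21a4 4 0 01-4-4V5a2 2 0 012-2h4a2 2 0 012 2v12a4 4 0 01-4 4zm0 0h12a2 2 0 002-2v-4a2 2 0 00-2-2h-2.343M11 7.343l1.657-1.657a2 2 0 012.828 0l2.829 2.829a2 2 0 010 2.828l-8.486 8.485M7 17h.01\"/>"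
def pvIcon11 : String := "<path stroke-linecap=\"round\" stroke-linejoin=\"round\" stroke-width=\"2\" d=\"M10.325 4.317c.426-1.756 2.924-1.756 3.35 0a1.724 1.724 0 002.573 1.066c1.543-.94 3.31.826 2.37 2.37a1.724 1.724 0 001.065 2.572c1.756.426 1.756 2.924 0 3.35a1.724 1.724 0 00-1.066 2.573c.94 1.543-.826 3.31-2.37 2.37a1.724 1.724 0 00-2.572 1.065c-.426 1.756-2.924 1.756-3.35 0a1.724 1.724 0 00-2.573-1.066c-1.543.94-3.31-.826-2.37-2.37a1.724 1.724 0 00-1.065-2.572c-1.756-.426-1.756-2.924 0-3.35a1.724 1.724 0 001.066-2.573c-.94-1.543.826-3.31 2.37-2.37.996.608 2.296.07 2.572-1.065z\"/><path stroke-linecap=\"round\" stroke-linejoin=\"round\" stroke-width=\"2\" d=\"M15 12a3 3 0 11-6 0 3 3 0 016 0z\"/>"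
def pvIcon12 : String := "<path stroke-linecap=\"round\" stroke-linejoin=\"round\" stroke-width=\"2\" d=\"M12 19l9 2-9-18-9 18 9-2zm0 0v-8\"/>"
def pvIcon13 : String := "<path stroke-linecap=\"round\" stroke-linejoin=\"round\" stroke-width=\"2\" d=\"M8 5H6a2 2 0 00-2 2v6a2 2 0 002 2h2m2-2V9a2 2 0 012-2h2a2 2 0 012 2v.01M15 8v.01\"/>"
def pvIcon14 : String := "<path stroke-linecap=\"round\" stroke-linejoin=\"round\" stroke-width=\"2\" d=\"M19.428 15.428a2 2 0 00-1.022-.547l-2.387-.477a6 6 0 00-3.86.517l-.318.158a6 6 0 01-3.86.517L6.05 15.21a2 2 0 00-1.806.547M8 4h8l-1 1v5.172a2 2 0 00.586 1.414l5 5c1.26 1.26.367 3.414-1.415 3.414H4.828c-1.782 0-2.674-2.154-1.414-3.414l5-5A2 2 0 009 10.172V5L8 4z\"/>"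
def pvIcon15 : String := "<path d=\"M10 20V14H14V20H19V12H22L12 3L2 12H5V20H10Z\"/>"
def pvIcon16 : String := "<path d=\"M14 18V6C14 5.45 13.55 5 13 5H11C10.45 5 10 5.45 10 6V18L7 21L12 19L17 21L14 18Z\"/>"
def pvIcon17 : String := "<path d=\"M9 2V13C9 14.1 9.9 15 11 15H13C14.1 15 15 14.1 15 13V2H9Z\"/><path d=\"M12 15V22\"/>"
def pvIcon18 : String := "<path d=\"M14 2H6C4.9 2 4.01 2.9 4.01 4L4 20C4 21.1 4.89 22 6 22H18C19.1 22 20 21.1 20 20V8L14 2Z\"/>"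
def pvIconDefault : String := "<path d=\"M12 2L2 7L12 12L22 7L12 2Z\"/><path d=\"M2 17L12 22L22 17\"/><path d=\"M2 12L12 17L22 12\"/>"

def pvAnyIn (ws : List String) (s : String) : Bool := ws.any (fun w => PySem.Str.isIn w s)

-- ===== PORT A =====
def get_category_icon_and_color (name : String) : String × String :=
  let name_lower := PySem.Str.lower name
  if pvAnyIn ["restoran", "kafe", "fast-food", "ovqat"] name_lower then (pvIcon0, "red")
  else if pvAnyIn ["bank", "moliya", "fintech"] name_lower then (pvIcon1, "blue")
  else if pvAnyIn ["it", "texnologiya", "dasturlash", "konsalting", "raqamli"] name_lower then (pvIcon2, "purple")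
  else if pvAnyIn ["tibbiyot", "klinika", "dorixona", "health"] name_lower then (pvIcon3, "green")
  else if pvAnyIn ["ta'lim", "maktab", "universitet", "kurs"] name_lower then (pvIcon4, "orange")
  else if pvAnyIn ["savdo", "do'kon", "supermarket", "chakana", "commerce", "elektronika"] name_lower then (pvIcon5, "yellow")
  else if pvAnyIn ["avtomobil", "automotive", "transport", "avto"] name_lower then (pvIcon6, "gray")
  else if pvAnyIn ["qurilish", "construction", "materiallari"] name_lower then (pvIcon7, "orange")
  else if pvAnyIn ["telekommunikatsiya", "operator", "mobile"] name_lower then (pvIcon8, "blue")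
  else if pvAnyIn ["energetika", "energy", "electricity"] name_lower then (pvIcon9, "yellow")
  else if pvAnyIn ["to'qimachilik", "textile", "fashion"] name_lower then (pvIcon10, "pink")
  else if pvAnyIn ["metallurgiya", "metal", "mining", "konchilik"] name_lower then (pvIcon11, "gray")
  else if pvAnyIn ["aviatsiya", "aviation", "aircraft"] name_lower then (pvIcon12, "blue")
  else if pvAnyIn ["beverage", "ichimlik", "drink"] name_lower then (pvIcon13, "green")
  else if pvAnyIn ["kimyo", "chemical", "sanoati"] name_lower then (pvIcon14, "purple")
  else if pvAnyIn ["mulk", "real estate", "property"] name_lower then (pvIcon15, "green")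
  else if pvAnyIn ["logistika", "yetkazib", "delivery", "eksport"] name_lower then (pvIcon16, "orange")
  else if pvAnyIn ["oil", "gas", "neft"] name_lower then (pvIcon17, "gray")
  else if pvAnyIn ["test", "sinov"] name_lower then (pvIcon18, "gray")
  else (pvIconDefault, "gray")

-- ===== PORT B =====
def pvKeyPri : List (String × Nat) := [
  ("restoran", 0),
  ("kafe", 0),
  ("fast-food", 0),
  ("ovqat", 0),
  ("bank", 1),
  ("moliya", 1),
  ("fintech", 1),
  ("it", 2),
  ("texnologiya", 2),
  ("dasturlash", 2),
  ("konsalting", 2),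
  ("raqamli", 2),
  ("tibbiyot", 3),
  ("klinika", 3),
  ("dorixona", 3),
  ("health", 3),
  ("ta'lim", 4),
  ("maktab", 4),
  ("universitet", 4),
  ("kurs", 4),
  ("savdo", 5),
  ("do'kon", 5),
  ("supermarket", 5),
  ("chakana", 5),
  ("commerce", 5),
  ("elektronika", 5),
  ("avtomobil", 6),
  ("automotive", 6),
  ("transport", 6),
  ("avto", 6),
  ("qurilish", 7),
  ("construction", 7),
  ("materiallari", 7),
  ("telekommunikatsiya", 8),
  ("operator", 8),
  ("mobile", 8),
  ("energetika", 9),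
  ("energy", 9),
  ("electricity", 9),
  ("to'qimachilik", 10),
  ("textile", 10),
  ("fashion", 10),
  ("metallurgiya", 11),
  ("metal", 11),
  ("mining", 11),
  ("konchilik", 11),
  ("aviatsiya", 12),
  ("aviation", 12),
  ("aircraft", 12),
  ("beverage", 13),
  ("ichimlik", 13),
  ("drink", 13),
  ("kimyo", 14),
  ("chemical", 14),
  ("sanoati", 14),
  ("mulk", 15),
  ("real estate", 15),
  ("property", 15),
  ("logistika", 16),
  ("yetkazib", 16),
  ("delivery", 16),
  ("eksport", 16),
  ("oil", 17),
  ("gas", 17),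
  ("neft", 17),
  ("test", 18),
  ("sinov", 18)
]
def pvOuts : List (String × String) := [
  (pvIcon0, "red"),
  (pvIcon1, "blue"),
  (pvIcon2, "purple"),
  (pvIcon3, "green"),
  (pvIcon4, "orange"),
  (pvIcon5, "yellow"),
  (pvIcon6, "gray"),
  (pvIcon7, "orange"),
  (pvIcon8, "blue"),
  (pvIcon9, "yellow"),
  (pvIcon10, "pink"),
  (pvIcon11, "gray"),
  (pvIcon12, "blue"),
  (pvIcon13, "green"),
  (pvIcon14, "purple"),
  (pvIcon15, "green"),
  (pvIcon16, "orange"),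
  (pvIcon17, "gray"),
  (pvIcon18, "gray"),
  (pvIconDefault, "gray")
]

def get_category_icon_and_color_alt (name : String) : String × String :=
  let s := PySem.Str.lower name
  let ms := pvKeyPri.filterMap (fun wp => if PySem.Str.isIn wp.1 s then some wp.2 else none)
  pvOuts.getD ((PySem.List.min? ms (fun x => x)).getD (pvOuts.length - 1)) (pvIconDefault, "gray")

-- ===== PRECONDITION & SPEC =====
def Spec_get_category_icon_and_color (name : String) (out : String × String) : Prop := out = get_category_icon_and_color_alt name
instance (name : String) (out : String × String) : Decidable (Spec_get_category_icon_and_color name out) := by unfold Spec_get_category_icon_and_color; infer_instance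

-- ===== CLAIM =====
def Claim_equal_get_category_icon_and_color : Prop := ∀ (name : String), Dom_get_category_icon_and_color name → Spec_get_category_icon_and_color name (get_category_icon_and_color name)

-- ===== LEMMAS AND PROOFS =====
theorem pvLenEval : pvOuts.length - 1 = 19 := rfl

def pvFin (o : Option (String × Nat)) : String × String :=
  pvOuts.getD ((o.map Prod.snd).getD 19) (pvIconDefault, "gray")

theorem pv_find?_cons_bool {α : Type} (p : α → Bool) (a : α) (l : List α) :
    List.find? p (a :: l) = if p a then some a else List.find? p l := by
  by_cases h : p a <;> simp [h]

theorem pv_foldl_min_of_le (t : List Nat) (x : Nat) (h : ∀ y ∈ t, x ≤ y) :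
    t.foldl min x = x := by
  induction t with
  | nil => rfl
  | cons y t ih =>
    simp only [List.foldl_cons, min_eq_left (h y (by simp))]
    exact ih (fun z hz => h z (by simp [hz]))

theorem pv_min?_cons_of_le (x : Nat) (t : List Nat) (h : ∀ y ∈ t, x ≤ y) :
    PySem.List.min? (x :: t) (fun y => y) = some x := by
  rw [PySem.List.min?_id_cons, pv_foldl_min_of_le t x h]

theorem pv_minFilter (s : String) (l : List (String × Nat))
    (hmono : l.Pairwise (fun a b => a.2 ≤ b.2)) :
    PySem.List.min? (l.filterMap fun wp => if PySem.Str.isIn wp.1 s then some wp.2 else none) (fun x => x)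
      = (l.find? (fun wp => PySem.Str.isIn wp.1 s)).map Prod.snd := by
  induction l with
  | nil => simp [PySem.List.min?_eq_none_iff]
  | cons wp l ih =>
    rcases List.pairwise_cons.mp hmono with ⟨hle, htail⟩
    by_cases h : PySem.Str.isIn wp.1 s
    · rw [List.filterMap_cons, pv_find?_cons_bool]
      simp only [h, if_true, Option.map_some]
      refine pv_min?_cons_of_le _ _ (fun y hy => ?_)
      rcases List.mem_filterMap.mp hy with ⟨z, hz, hzy⟩
      simp only [Option.ite_none_right_eq_some, Option.some.injEq] at hzy
      exact hzy.2 ▸ hle z hz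
    · rw [List.filterMap_cons, pv_find?_cons_bool]
      simp only [h]
      exact ih htail

theorem pvKeyPri_mono : pvKeyPri.Pairwise (fun a b => a.2 ≤ b.2) := by
  unfold pvKeyPri; decide

theorem pvFinSome (w : String) (k : Nat) :
    pvFin (some (w, k)) = pvOuts.getD k (pvIconDefault, "gray") := rfl

theorem pvFinNone : pvFin none = pvOuts.getD 19 (pvIconDefault, "gray") := rfl

theorem pv_if_or {α : Type} (a b : Bool) (v r : α) :
    (if a then v else if b then v else r) = if (a || b) then v else r := by
  cases a <;> simp

theorem pvOutsEval0 : pvOuts.getD 0 (pvIconDefault, "gray") = (pvIcon0, "red") := rfl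
theorem pvOutsEval1 : pvOuts.getD 1 (pvIconDefault, "gray") = (pvIcon1, "blue") := rfl
theorem pvOutsEval2 : pvOuts.getD 2 (pvIconDefault, "gray") = (pvIcon2, "purple") := rfl
theorem pvOutsEval3 : pvOuts.getD 3 (pvIconDefault, "gray") = (pvIcon3, "green") := rfl
theorem pvOutsEval4 : pvOuts.getD 4 (pvIconDefault, "gray") = (pvIcon4, "orange") := rfl
theorem pvOutsEval5 : pvOuts.getD 5 (pvIconDefault, "gray") = (pvIcon5, "yellow") := rfl
theorem pvOutsEval6 : pvOuts.getD 6 (pvIconDefault, "gray") = (pvIcon6, "gray") := rfl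
theorem pvOutsEval7 : pvOuts.getD 7 (pvIconDefault, "gray") = (pvIcon7, "orange") := rfl
theorem pvOutsEval8 : pvOuts.getD 8 (pvIconDefault, "gray") = (pvIcon8, "blue") := rfl
theorem pvOutsEval9 : pvOuts.getD 9 (pvIconDefault, "gray") = (pvIcon9, "yellow") := rfl
theorem pvOutsEval10 : pvOuts.getD 10 (pvIconDefault, "gray") = (pvIcon10, "pink") := rfl
theorem pvOutsEval11 : pvOuts.getD 11 (pvIconDefault, "gray") = (pvIcon11, "gray") := rfl
theorem pvOutsEval12 : pvOuts.getD 12 (pvIconDefault, "gray") = (pvIcon12, "blue") := rfl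
theorem pvOutsEval13 : pvOuts.getD 13 (pvIconDefault, "gray") = (pvIcon13, "green") := rfl
theorem pvOutsEval14 : pvOuts.getD 14 (pvIconDefault, "gray") = (pvIcon14, "purple") := rfl
theorem pvOutsEval15 : pvOuts.getD 15 (pvIconDefault, "gray") = (pvIcon15, "green") := rfl
theorem pvOutsEval16 : pvOuts.getD 16 (pvIconDefault, "gray") = (pvIcon16, "orange") := rfl
theorem pvOutsEval17 : pvOuts.getD 17 (pvIconDefault, "gray") = (pvIcon17, "gray") := rfl
theorem pvOutsEval18 : pvOuts.getD 18 (pvIconDefault, "gray") = (pvIcon18, "gray") := rfl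
theorem pvOutsEval19 : pvOuts.getD 19 (pvIconDefault, "gray") = (pvIconDefault, "gray") := rfl

-- ===== VERDICT =====
theorem get_category_icon_and_color_spec : Claim_equal_get_category_icon_and_color := by
  intro name _
  unfold Spec_get_category_icon_and_color get_category_icon_and_color get_category_icon_and_color_alt
  dsimp only
  rw [pvLenEval, pv_minFilter _ _ pvKeyPri_mono]
  show _ = pvFin (pvKeyPri.find? (fun wp => PySem.Str.isIn wp.1 (PySem.Str.lower name)))
  simp only [pvKeyPri, pv_find?_cons_bool, List.find?_nil, apply_ite pvFin,
    pvFinSome, pvFinNone,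
    pvOutsEval0, pvOutsEval1, pvOutsEval2, pvOutsEval3, pvOutsEval4, pvOutsEval5,
    pvOutsEval6, pvOutsEval7, pvOutsEval8, pvOutsEval9, pvOutsEval10, pvOutsEval11,
    pvOutsEval12, pvOutsEval13, pvOutsEval14, pvOutsEval15, pvOutsEval16, pvOutsEval17,
    pvOutsEval18, pvOutsEval19, pv_if_or,
    pvAnyIn, List.any_cons, List.any_nil, Bool.or_false]
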